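-- pv_equiv track=rewrite | github.com/go-hare/reachy_mini | src/ccmini/services/session_memory.py | _analyze_sections
-- ===== SOURCE A (Python) =====
-- def _analyze_sections(content: str) -> dict[str, int]:
--     """Parse markdown sections and estimate their token counts."""
--     sections: dict[str, int] = {}
--     lines = content.split("\n")
--     current_section = ""
--     current_lines: list[str] = []
--
--     for line in lines:
--         if line.startswith("# "):
--             if current_section and current_lines:
--                 text = "\n".join(current_lines).strip()
--                 sections[current_section] = len(text) // 4
--             current_section = line
--             current_lines = []
--         else:
--             current_lines.append(line)
--
--     if current_section and current_lines:
--         text = "\n".join(current_lines).strip()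
--         sections[current_section] = len(text) // 4
--
--     return sections
-- ===== SOURCE B (Python) =====
-- def _analyze_sections(content: str) -> dict[str, int]:
--     """Parse markdown sections and estimate their token counts."""
--     sections: dict[str, int] = {}
--     lines = content.split("\n")
--     n = len(lines)
--     i = 0
--     # skip the preamble before the first header
--     while i < n and not lines[i].startswith("# "):
--         i += 1
--     # each header: scan forward to the next header, slice the body out
--     while i < n:
--         j = i + 1
--         while j < n and not lines[j].startswith("# "):
--             j += 1
--         body = lines[i + 1 : j]
--         if body:
--             sections[lines[i]] = len("\n".join(body).strip()) // 4
--         i = j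
--     return sections
-- ===== Notes on version B (the rewrite author's own statement) =====
-- stated objective: alternative
-- what changed: A streams the lines through current_section/current_lines accumulators with a duplicated end-of-loop flush; B skips the preamble, then for each header scans forward to the next header and slices the body lines out, assigning the token estimate directly (no accumulators, no final flush).
import Mathlib
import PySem

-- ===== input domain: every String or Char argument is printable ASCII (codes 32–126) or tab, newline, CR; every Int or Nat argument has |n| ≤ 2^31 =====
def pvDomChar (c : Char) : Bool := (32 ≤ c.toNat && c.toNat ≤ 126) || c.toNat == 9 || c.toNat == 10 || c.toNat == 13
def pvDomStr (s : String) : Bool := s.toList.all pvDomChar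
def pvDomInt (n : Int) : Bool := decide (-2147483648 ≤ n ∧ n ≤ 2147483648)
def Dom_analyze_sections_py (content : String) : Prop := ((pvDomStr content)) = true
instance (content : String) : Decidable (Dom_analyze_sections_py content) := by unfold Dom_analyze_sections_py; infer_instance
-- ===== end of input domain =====

-- B replaces A's running section/lines accumulators (with an end-of-loop flush) by a scan that
-- slices the body lines between consecutive headers; objective: alternative decomposition.

-- shared rendering of Python's  'if line.startswith("# ")'  and  'len("\n".join(ls).strip()) // 4'
def pvHdr (l : String) : Bool := PySem.Str.startswith l "# "
def pvTok (ls : List String) : Int :=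
  PySem.Int.floordiv (PySem.Str.len (PySem.Str.strip (PySem.Str.join "\n" ls))) 4

-- ===== PORT A =====
-- 'if current_section and current_lines: sections[current_section] = len(...)//4'
def pvFinishA (d : PySem.Dict String Int) (cs : String) (cl : List String) : PySem.Dict String Int :=
  if cs ≠ "" ∧ cl ≠ [] then d.insert cs (pvTok cl) else d

-- the for-loop over lines, state = (sections, current_section, current_lines); final flush at []
def pvLoopA (d : PySem.Dict String Int) (cs : String) (cl : List String) :
    List String → PySem.Dict String Int
  | [] => pvFinishA d cs cl
  | l :: rest =>
      if pvHdr l then pvLoopA (pvFinishA d cs cl) l [] rest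
      else pvLoopA d cs (cl ++ [l]) rest

def analyze_sections_py (content : String) : List (String × Int) :=
  (pvLoopA PySem.Dict.empty "" [] ((PySem.Str.split? content "\n").getD [])).items

-- ===== PORT B =====
-- outer while: lines starts at a header (or is empty); inner while j-scan = takeWhile/dropWhile
def pvLoopB (d : PySem.Dict String Int) : List String → PySem.Dict String Int
  | [] => d
  | h :: rest =>
      let body := rest.takeWhile (fun l => !pvHdr l)
      pvLoopB (if body ≠ [] then d.insert h (pvTok body) else d)
        (rest.dropWhile (fun l => !pvHdr l))
  termination_by ls => ls.length
  decreasing_by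
    simpa using Nat.lt_succ_of_le (List.length_dropWhile_le _ _)

def analyze_sections_py_alt (content : String) : List (String × Int) :=
  let lines := (PySem.Str.split? content "\n").getD []
  (pvLoopB PySem.Dict.empty (lines.dropWhile (fun l => !pvHdr l))).items

-- ===== PRECONDITION & SPEC =====
def Spec_analyze_sections_py (content : String) (out : List (String × Int)) : Prop := out = analyze_sections_py_alt content
instance (content : String) (out : List (String × Int)) : Decidable (Spec_analyze_sections_py content out) := by unfold Spec_analyze_sections_py; infer_instance

-- ===== CLAIM (what is proved, stated in full; the proofs are below) =====
def Claim_equal_analyze_sections_py : Prop := ∀ (content : String), Dom_analyze_sections_py content → Spec_analyze_sections_py content (analyze_sections_py content)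

-- ===== LEMMAS AND PROOFS =====

lemma pvHdr_ne_empty {l : String} (h : pvHdr l = true) : l ≠ "" := by
  simp only [pvHdr, PySem.Str.startswith_eq] at h
  rw [PySem.Chars.startswith_iff] at h
  intro he
  subst he
  simpa using h.length_le

lemma pvLoopB_cons (d : PySem.Dict String Int) (h : String) (rest : List String) :
    pvLoopB d (h :: rest) =
      pvLoopB (if rest.takeWhile (fun l => !pvHdr l) ≠ [] then
          d.insert h (pvTok (rest.takeWhile (fun l => !pvHdr l))) else d)
        (rest.dropWhile (fun l => !pvHdr l)) := by
  rw [pvLoopB.eq_def]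

-- for a header cs, A's flush condition coincides with B's 'slice non-empty' test
lemma pvFinishA_hdr (d : PySem.Dict String Int) {cs : String} (h : pvHdr cs = true)
    (cl : List String) :
    pvFinishA d cs cl = if cl ≠ [] then d.insert cs (pvTok cl) else d := by
  simp [pvFinishA, pvHdr_ne_empty h]

-- A's loop from a header state = B's loop after flushing the accumulated + scanned body
lemma pvLoopA_header (lines : List String) :
    ∀ (d : PySem.Dict String Int) (cs : String) (cl : List String), pvHdr cs = true →
      pvLoopA d cs cl lines =
        pvLoopB (pvFinishA d cs (cl ++ lines.takeWhile (fun l => !pvHdr l)))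
          (lines.dropWhile (fun l => !pvHdr l)) := by
  induction lines with
  | nil => intro d cs cl _; simp [pvLoopA, pvLoopB]
  | cons l rest ih =>
      intro d cs cl hcs
      by_cases hl : pvHdr l = true
      · rw [show pvLoopA d cs cl (l :: rest) = pvLoopA (pvFinishA d cs cl) l [] rest by
          simp [pvLoopA, hl]]
        rw [ih (pvFinishA d cs cl) l [] hl]
        simp only [List.takeWhile_cons, List.dropWhile_cons, hl, Bool.not_true, Bool.false_eq_true,
          if_false, List.nil_append, List.append_nil]
        rw [pvLoopB_cons, pvFinishA_hdr _ hl]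
      · rw [show pvLoopA d cs cl (l :: rest) = pvLoopA d cs (cl ++ [l]) rest by
          simp [pvLoopA, hl]]
        rw [ih d cs (cl ++ [l]) hcs]
        simp [hl]

-- A's loop from the initial empty-section state = B after skipping the preamble
lemma pvLoopA_empty (lines : List String) :
    ∀ (d : PySem.Dict String Int) (cl : List String),
      pvLoopA d "" cl lines = pvLoopB d (lines.dropWhile (fun l => !pvHdr l)) := by
  induction lines with
  | nil => intro d cl; simp [pvLoopA, pvLoopB, pvFinishA]
  | cons l rest ih =>
      intro d cl
      by_cases hl : pvHdr l = true
      · rw [show pvLoopA d "" cl (l :: rest) = pvLoopA (pvFinishA d "" cl) l [] rest by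
          simp [pvLoopA, hl]]
        rw [show pvFinishA d "" cl = d by simp [pvFinishA]]
        rw [pvLoopA_header rest d l [] hl]
        simp only [List.dropWhile_cons, hl, Bool.not_true, Bool.false_eq_true, if_false]
        rw [pvLoopB_cons, pvFinishA_hdr _ hl]
        simp
      · rw [show pvLoopA d "" cl (l :: rest) = pvLoopA d "" (cl ++ [l]) rest by
          simp [pvLoopA, hl]]
        rw [ih d (cl ++ [l])]
        simp [hl]

-- ===== VERDICT (by name: the statement is the Claim_ definition above) =====
theorem analyze_sections_py_spec : Claim_equal_analyze_sections_py := by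
  intro content _
  show analyze_sections_py content = analyze_sections_py_alt content
  unfold analyze_sections_py analyze_sections_py_alt
  rw [pvLoopA_empty]
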